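-- pv_equiv track=rewrite | github.com/toutelajourn6e/BOJ-Programmers | 프로그래머스/unrated/181874. A 강조하기/A 강조하기.py | solution
-- ===== SOURCE A (Python) =====
-- def solution(myString):
--     ans = ''
--     for i in myString:
--         if i in ['a', 'A']:
--             ans += i.upper()
--         else:
--             ans += i.lower()
--     return ans
-- ===== SOURCE B (Python) =====
-- def solution(myString):
--     return myString.lower().replace('a', 'A')
-- ===== Notes on version B (the rewrite author's own statement) =====
-- stated objective: idiomatic
-- what changed: Replaces the per-character branching loop with two whole-string library passes: lowercase everything, then replace the lowercase letter a with uppercase A.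
import Mathlib
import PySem

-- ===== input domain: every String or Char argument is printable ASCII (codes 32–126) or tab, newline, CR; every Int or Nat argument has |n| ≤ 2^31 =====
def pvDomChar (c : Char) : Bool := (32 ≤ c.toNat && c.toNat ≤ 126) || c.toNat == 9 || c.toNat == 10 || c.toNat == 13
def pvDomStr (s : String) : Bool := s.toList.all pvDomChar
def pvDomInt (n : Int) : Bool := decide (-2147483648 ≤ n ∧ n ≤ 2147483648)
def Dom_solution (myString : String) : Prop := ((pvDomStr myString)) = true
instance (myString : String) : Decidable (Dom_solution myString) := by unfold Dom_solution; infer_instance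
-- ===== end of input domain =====

-- B replaces A's per-character branching loop by two whole-string library passes (lower, then replace 'a'→'A'); idiomatic, not claimed faster.

-- ===== PORT A =====
-- loop over the characters; the accumulator string is carried as List Char and packed at the end
def solution (myString : String) : String :=
  String.ofList (myString.toList.foldl
    (fun ans i =>
      if i ∈ ['a', 'A'] then ans ++ [PySem.Chars.upperChar i]
      else ans ++ [PySem.Chars.lowerChar i]) [])

-- ===== PORT B =====
def solution_alt (myString : String) : String :=
  PySem.Str.replace (PySem.Str.lower myString) "a" "A"

-- ===== PRECONDITION & SPEC =====
def Spec_solution (myString : String) (out : String) : Prop := out = solution_alt myString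
instance (myString : String) (out : String) : Decidable (Spec_solution myString out) := by unfold Spec_solution; infer_instance

-- ===== CLAIM (what is proved, stated in full; the proofs are below) =====
def Claim_equal_solution : Prop := ∀ (myString : String), Dom_solution myString → Spec_solution myString (solution myString)

-- ===== LEMMAS AND PROOFS =====

-- single-char replace is a pointwise map
theorem replace_go_single (new : List Char) (l acc : List Char) :
    PySem.Chars.replace.go ['a'] new l.length l acc
      = acc.reverse ++ l.flatMap (fun c => if c = 'a' then new else [c]) := by
  induction l generalizing acc with
  | nil => simp [PySem.Chars.replace.go]
  | cons c t ih =>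
      rw [List.length_cons, PySem.Chars.replace.go]
      by_cases h : c = 'a'
      · subst h
        simp only [List.isPrefixOf, Bool.and_true, beq_self_eq_true,
          if_pos, List.length_cons, List.drop_succ_cons, List.drop_zero, List.length_nil]
        rw [ih]
        simp
      · have : (['a'].isPrefixOf (c :: t)) = false := by
          simp only [List.isPrefixOf, Bool.and_eq_false_iff, beq_eq_false_iff_ne, ne_eq]
          left; intro h'; exact h h'.symm
        rw [this]
        simp only [Bool.false_eq_true, if_false]
        rw [ih]
        simp [h]

theorem replace_single (new : List Char) (l : List Char) :
    PySem.Chars.replace l ['a'] new = l.flatMap (fun c => if c = 'a' then new else [c]) := by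
  rw [PySem.Chars.replace]
  simp only [List.isEmpty_cons, Bool.false_eq_true, if_false]
  simpa using replace_go_single new l []

-- the per-character branch of A agrees with lower-then-replace on every character
theorem pointwise (c : Char) :
    (if c ∈ ['a', 'A'] then [PySem.Chars.upperChar c] else [PySem.Chars.lowerChar c])
      = (if PySem.Chars.lowerChar c = 'a' then ['A'] else [PySem.Chars.lowerChar c]) := by
  by_cases ha : c = 'a'
  · subst ha; decide
  · by_cases hA : c = 'A'
    · subst hA; decide
    · have hmem : c ∉ ['a', 'A'] := by simp [ha, hA]
      rw [if_neg hmem]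
      have : PySem.Chars.lowerChar c ≠ 'a' := by
        unfold PySem.Chars.lowerChar
        split_ifs with hu
        · -- c is an ASCII uppercase letter, c ≠ 'A'
          unfold PySem.Chars.isupper at hu
          rcases Bool.and_eq_true .. |>.mp hu with ⟨h1, h2⟩
          have h1' : 65 ≤ c.toNat := UInt32.le_iff_toNat_le.mp (Char.le_def.mp (of_decide_eq_true h1))
          have h2' : c.toNat ≤ 90 := UInt32.le_iff_toNat_le.mp (Char.le_def.mp (of_decide_eq_true h2))
          intro hEq
          have hval : (Char.ofNat (c.toNat + 32)).toNat = c.toNat + 32 := by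
            rw [Char.toNat_ofNat, if_pos]
            left; omega
          have h97 : c.toNat + 32 = 97 := by
            rw [← hval, hEq]; decide
          have hc : c.toNat = ('A' : Char).toNat := by
            have : c.toNat = 65 := by omega
            rw [this]; rfl
          exact hA (Char.ext (UInt32.toNat_inj.mp hc))
        · intro hEq; exact ha hEq
      rw [if_neg this]

theorem foldl_snoc (l : List Char) (f : Char → List Char) (acc : List Char) :
    l.foldl (fun ans i => ans ++ f i) acc = acc ++ l.flatMap (fun i => f i) := by
  induction l generalizing acc with
  | nil => simp
  | cons c t ih => simp [List.foldl, ih]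

-- ===== VERDICT (by name: the statement is the Claim_ definition above) =====
theorem solution_spec : Claim_equal_solution := by
  intro s _
  unfold Spec_solution solution solution_alt
  have hB : (PySem.Str.replace (PySem.Str.lower s) "a" "A").toList
      = PySem.Chars.replace (PySem.Chars.lower s.toList) ['a'] ['A'] := by
    rw [PySem.Str.toList_replace, PySem.Str.toList_lower]; rfl
  have hfix : PySem.Str.replace (PySem.Str.lower s) "a" "A"
      = String.ofList (PySem.Chars.replace (PySem.Chars.lower s.toList) ['a'] ['A']) := by
    rw [← hB, String.ofList_toList]
  rw [hfix]
  refine congrArg String.ofList ?_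
  rw [replace_single]
  have hbody : (fun (ans : List Char) (i : Char) =>
        if i ∈ ['a', 'A'] then ans ++ [PySem.Chars.upperChar i] else ans ++ [PySem.Chars.lowerChar i])
      = fun ans i => ans ++ (if i ∈ ['a', 'A'] then [PySem.Chars.upperChar i] else [PySem.Chars.lowerChar i]) := by
    funext ans i; split_ifs <;> rfl
  rw [hbody, foldl_snoc, funext pointwise]
  simp only [List.nil_append, PySem.Chars.lower, List.flatMap_map]
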